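-- pv_equiv track=rewrite | github.com/jamiebellthomas/Intro-to-Computer-Programming | Coursework 1/task2_functions.py | chemical_formula_builder
-- ===== SOURCE A (Python) =====
-- def seperate_string_number(input):
--     """
--     This function takes a string and splits it into a list of strings of numbers and letters. It does this by checking if the character is
--     of the same type to the previous character, if it is the loop carries on and if not it adds the character to a new string in the list
--     and starts again
--     """
--
--     previous_character = input[0]
--     groups = [] # This list will contain the groupings of numbers and letters.
--     newword = input[0] # The first character in the input string is added to the newword variable
--     for x, i in enumerate(input[1:]):
--         # This loop starts at the second character in the input string and loops through the rest of the string.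
--         if i.isalpha() and previous_character.isalpha():
--             newword += i
--         elif i.isnumeric() and previous_character.isnumeric():
--             newword += i
--         # If the current character is the same type as the previous character, it is added to the newword variable.
--         else:
--             groups.append(newword)
--             newword = i
--         # If the current character is not the same type as the previous character, the newword variable is added
--         # to the groups list and the newword variable is reset to the current character.
--
--         previous_character = i
--         # The previous character variable is updated to the current character.
--
--         if x == len(input) - 2:
--             groups.append(newword)
--             newword = ''
--         # This if statement checks if the loop is on the last character in the input string. If it is, the newword
--         # variable is added to the groups list and the newword variable is reset to an empty string.
--     return groups
--
-- def chemical_formula_builder(user_input):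
--     """
--     This function takes the user input and builds the chemical formula aswell as making sure no coefficients = 1
--     """
--     chemical_formula = ""
--     for i in user_input:
--         letter_and_number_list = seperate_string_number(i)
--         # This function utilises the seperate_string_number function to seperate the coefficient and element symbol.
--         if letter_and_number_list[0] == '1':
--             chemical_formula += letter_and_number_list[1].capitalize()
--             # If the coefficient is 1, only the element symbol is added to the chemical formula.
--         else:
--             chemical_formula += letter_and_number_list[1].capitalize() + letter_and_number_list[0]
--             # If the coefficient is not 1, the element symbol and coefficient are added to the chemical formula in that order.
--
--     return chemical_formula
-- ===== SOURCE B (Python) =====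
-- def _run_end(token, i):
--     # index just past the maximal same-class run starting at token[i]
--     # (a character that is neither alphabetic nor numeric is a run of length 1)
--     c = token[i]
--     j = i + 1
--     if c.isalpha():
--         while j < len(token) and token[j].isalpha():
--             j += 1
--     elif c.isnumeric():
--         while j < len(token) and token[j].isnumeric():
--             j += 1
--     return j
--
-- def chemical_formula_builder(user_input):
--     pieces = []
--     for token in user_input:
--         cut = _run_end(token, 0)
--         coefficient = token[:cut]
--         element = token[cut:_run_end(token, cut)]
--         pieces.append(element.capitalize() if coefficient == '1'
--                       else element.capitalize() + coefficient)
--     return "".join(pieces)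
-- ===== Notes on version B (the rewrite author's own statement) =====
-- stated objective: alternative
-- what changed: B never builds A's full group list or its previous_character/newword/x==len-2 walk: it locates the end of the first and second class runs by index scanning (_run_end), slices coefficient and element directly out of the token, and joins a list of per-token pieces at the end.
import Mathlib
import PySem

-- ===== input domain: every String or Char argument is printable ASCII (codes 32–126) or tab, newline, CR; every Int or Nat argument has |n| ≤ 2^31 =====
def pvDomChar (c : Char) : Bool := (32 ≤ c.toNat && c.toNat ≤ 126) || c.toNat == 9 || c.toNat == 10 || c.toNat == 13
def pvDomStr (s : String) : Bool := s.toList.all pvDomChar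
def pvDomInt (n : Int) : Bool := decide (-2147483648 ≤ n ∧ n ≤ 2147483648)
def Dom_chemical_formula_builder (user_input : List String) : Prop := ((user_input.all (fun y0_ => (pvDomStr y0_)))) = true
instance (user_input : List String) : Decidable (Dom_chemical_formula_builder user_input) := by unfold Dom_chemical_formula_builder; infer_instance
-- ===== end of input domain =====

-- B drops A's full group-list construction (previous_character / newword / the
-- x == len(input)-2 bookkeeping): it index-scans only the first two class runs,
-- slices coefficient and element out of the token, and joins per-token pieces
-- (objective: alternative decomposition).

-- ===== PORT A =====
-- Strings are handled as List Char (PySem.Chars is defined on lists); String.ofList wraps the result.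
-- Python's str.isnumeric on the printable-ASCII domain is exactly isdigit.
def pvSameA (i prev : Char) : Bool := PySem.Chars.isalpha i && PySem.Chars.isalpha prev
def pvSameN (i prev : Char) : Bool := PySem.Chars.isdigit i && PySem.Chars.isdigit prev

-- str.capitalize(), exact on ASCII: first character uppercased, the rest lowercased
def pvCapitalize (cs : List Char) : List Char :=
  match cs with
  | [] => []
  | c :: t => PySem.Chars.upperChar c :: PySem.Chars.lower t

-- the 'for x, i in enumerate(input[1:])' loop of seperate_string_number, state (prev, groups, newword)
def pvSepLoop (inputLen : Nat) (rest : List Char) (x : Nat) (prev : Char)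
    (groups : List (List Char)) (newword : List Char) : List (List Char) :=
  match rest with
  | [] => groups
  | i :: rest' =>
    let gn : List (List Char) × List Char :=
      if pvSameA i prev then (groups, newword ++ [i])
      else if pvSameN i prev then (groups, newword ++ [i])
      else (groups ++ [newword], [i])
    let prev' := i
    let gn' : List (List Char) × List Char :=
      if x == inputLen - 2 then (gn.1 ++ [gn.2], []) else gn
    pvSepLoop inputLen rest' (x + 1) prev' gn'.1 gn'.2

def seperate_string_number (input : List Char) : List (List Char) :=
  match input with
  | [] => []            -- Python raises IndexError on input[0]; excluded by Pre_
  | c :: rest => pvSepLoop input.length rest 0 c [] [c]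

def chemical_formula_builder (user_input : List String) : String :=
  String.ofList <| user_input.foldl (fun chemical_formula i =>
    let letter_and_number_list := seperate_string_number i.toList
    match PySem.List.pyGet? letter_and_number_list 0, PySem.List.pyGet? letter_and_number_list 1 with
    | some g0, some g1 =>
      if g0 = ['1'] then chemical_formula ++ pvCapitalize g1
      else chemical_formula ++ pvCapitalize g1 ++ g0
    | _, _ => chemical_formula   -- Python raises IndexError here; excluded by Pre_
    ) []

-- ===== PORT B =====
-- the 'while j < len(token) and token[j].<class>(): j += 1' loop of _run_end
def pvWhileRun (p : Char → Bool) (token : List Char) (j : Nat) : Nat :=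
  if j < token.length ∧ p (token.getD j ' ') then pvWhileRun p token (j + 1) else j
termination_by token.length - j
decreasing_by omega

-- _run_end(token, i); none = IndexError on token[i] (i is a nonnegative Python int here)
def pvRunEnd (token : List Char) (i : Nat) : Option Nat :=
  match PySem.List.pyGet? token (i : Int) with
  | none => none
  | some c =>
    if PySem.Chars.isalpha c then some (pvWhileRun PySem.Chars.isalpha token (i + 1))
    else if PySem.Chars.isdigit c then some (pvWhileRun PySem.Chars.isdigit token (i + 1))
    else some (i + 1)

-- str.capitalize(), exact on ASCII: uppercase the one-char head, lowercase the tail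
def pvCapitalizeAlt (cs : List Char) : List Char :=
  (cs.take 1).map PySem.Chars.upperChar ++ PySem.Chars.lower (cs.drop 1)

def chemical_formula_builder_alt (user_input : List String) : String :=
  String.ofList <| (user_input.foldl (fun pieces token =>
    let cs := token.toList
    match pvRunEnd cs 0 with
    | none => pieces             -- Python raises IndexError; excluded by Pre_
    | some cut =>
      match pvRunEnd cs cut with
      | none => pieces           -- Python raises IndexError; excluded by Pre_
      | some cut2 =>
        -- token[:cut] / token[cut:cut2] with 0 ≤ cut ≤ cut2 ≤ len: Python slices = take/drop
        let coefficient := cs.take cut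
        let element := (cs.drop cut).take (cut2 - cut)
        pieces ++ [if coefficient = ['1'] then pvCapitalizeAlt element
                   else pvCapitalizeAlt element ++ coefficient]) []).flatten

-- ===== PRECONDITION & SPEC =====
-- Pre_ excludes exactly the inputs on which the Python A raises IndexError: a token whose
-- characters form fewer than two class groups (empty or single-character tokens, and tokens
-- whose adjacent characters are all pairwise same-class: all letters or all digits).
def Pre_chemical_formula_builder (user_input : List String) : Prop :=
  ∀ s ∈ user_input, ∃ j < s.toList.length, j + 1 < s.toList.length ∧
    ¬ (PySem.Chars.isalpha (s.toList.getD (j+1) ' ') = true ∧ PySem.Chars.isalpha (s.toList.getD j ' ') = true) ∧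
    ¬ (PySem.Chars.isdigit (s.toList.getD (j+1) ' ') = true ∧ PySem.Chars.isdigit (s.toList.getD j ' ') = true)

instance (user_input : List String) : Decidable (Pre_chemical_formula_builder user_input) := by
  unfold Pre_chemical_formula_builder; infer_instance

def pvWitness_chemical_formula_builder : List String := ["2H", "1O", "3Na"]

def Spec_chemical_formula_builder (user_input : List String) (out : String) : Prop := out = chemical_formula_builder_alt user_input
instance (user_input : List String) (out : String) : Decidable (Spec_chemical_formula_builder user_input out) := by unfold Spec_chemical_formula_builder; infer_instance

-- ===== CLAIM (what is proved, stated in full; the proofs are below) =====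
def Claim_equal_chemical_formula_builder : Prop := ∀ (user_input : List String), Dom_chemical_formula_builder user_input → Pre_chemical_formula_builder user_input → Spec_chemical_formula_builder user_input (chemical_formula_builder user_input)


-- ===== LEMMAS AND PROOFS =====

-- proof-only run decomposition: maximal runs of equal character classes
inductive PvKey
  | alpha | num | other

def pvCharClass (c : Char) : PvKey :=
  if PySem.Chars.isalpha c then .alpha
  else if PySem.Chars.isdigit c then .num
  else .other

def pvKeyEq : PvKey → PvKey → Bool
  | .alpha, .alpha => true
  | .num, .num => true
  | _, _ => false     -- 'other' chars never join a run

def pvGroupby (cs : List Char) : List (List Char) :=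
  match cs with
  | [] => []
  | c :: rest =>
    let k := pvCharClass c
    (c :: rest.takeWhile (fun d => pvKeyEq k (pvCharClass d)))
      :: pvGroupby (rest.dropWhile (fun d => pvKeyEq k (pvCharClass d)))
termination_by cs.length
decreasing_by
  simp only [List.length_cons]
  exact Nat.lt_succ_of_le (List.length_dropWhile_le _ _)

-- a character is never both a letter and a digit
theorem pv_alpha_not_digit (c : Char) :
    PySem.Chars.isalpha c = true → PySem.Chars.isdigit c = false := by
  simp only [PySem.Chars.isalpha, PySem.Chars.isupper, PySem.Chars.islower, PySem.Chars.isdigit,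
    Bool.or_eq_true, Bool.and_eq_true, decide_eq_true_eq, Bool.and_eq_false_imp,
    decide_eq_false_iff_not, Char.le_def]
  intro h _
  rcases h with ⟨h1, h2⟩ | ⟨h1, h2⟩ <;>
  · revert h1 h2; simp [UInt32.le_iff_toNat_le]; omega

-- A's same-class test is the key equality of the run decomposition
theorem pv_same_eq_keyEq (i prev : Char) :
    (pvSameA i prev || pvSameN i prev) = pvKeyEq (pvCharClass prev) (pvCharClass i) := by
  unfold pvSameA pvSameN pvCharClass
  by_cases hai : PySem.Chars.isalpha i = true <;>
  by_cases hap : PySem.Chars.isalpha prev = true <;>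
  by_cases hdi : PySem.Chars.isdigit i = true <;>
  by_cases hdp : PySem.Chars.isdigit prev = true <;>
    simp_all [pv_alpha_not_digit, pvKeyEq]

theorem pv_keyEq_class_eq {a b : PvKey} (h : pvKeyEq a b = true) : a = b := by
  cases a <;> cases b <;> simp_all [pvKeyEq]

-- proof-only mirror of A's loop with the x == len-2 bookkeeping removed
def pvGlue (prev : Char) (nw : List Char) : List Char → List (List Char)
  | [] => []
  | i :: rest' =>
    if pvSameA i prev || pvSameN i prev then
      (if rest' = [] then [nw ++ [i]] else pvGlue i (nw ++ [i]) rest')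
    else
      nw :: (if rest' = [] then [[i]] else pvGlue i [i] rest')

theorem pvSepLoop_eq_glue (rest : List Char) :
    ∀ (x len : Nat) (prev : Char) (groups : List (List Char)) (nw : List Char),
      x + rest.length + 1 = len →
      pvSepLoop len rest x prev groups nw = groups ++ pvGlue prev nw rest := by
  induction rest with
  | nil => intro x len prev groups nw _; simp [pvSepLoop, pvGlue]
  | cons i rest' ih =>
    intro x len prev groups nw hlen
    have hx : (x == len - 2) = decide (rest' = []) := by
      rcases rest' with _ | ⟨a, t⟩ <;> simp at hlen ⊢ <;> omega
    unfold pvSepLoop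
    rw [ih (x + 1) len i _ _ (by simp at hlen ⊢; omega)]
    rw [hx]
    rcases rest' with _ | ⟨a, t⟩ <;>
      rcases hA : pvSameA i prev with _ | _ <;> rcases hN : pvSameN i prev with _ | _ <;>
      simp [pvGlue, hA, hN]

theorem pvGlue_eq_groupby (rest : List Char) :
    ∀ (prev : Char) (nw : List Char), rest ≠ [] →
      pvGlue prev nw rest =
        (nw ++ rest.takeWhile (fun d => pvKeyEq (pvCharClass prev) (pvCharClass d)))
          :: pvGroupby (rest.dropWhile (fun d => pvKeyEq (pvCharClass prev) (pvCharClass d))) := by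
  induction rest with
  | nil => intro _ _ h; exact absurd rfl h
  | cons i rest' ih =>
    intro prev nw _
    unfold pvGlue
    rcases hs : (pvSameA i prev || pvSameN i prev) with _ | _
    · have hk : pvKeyEq (pvCharClass prev) (pvCharClass i) = false := by
        rw [← pv_same_eq_keyEq]; exact hs
      simp only [Bool.false_eq_true, if_false, List.takeWhile_cons, List.dropWhile_cons, hk,
        List.append_nil]
      rcases hr : rest' with _ | ⟨a, t⟩
      · simp [pvGroupby]
      · subst hr
        rw [ih i [i] (by simp)]
        conv_rhs => rw [pvGroupby]
        simp
    · have hk : pvKeyEq (pvCharClass prev) (pvCharClass i) = true := by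
        rw [← pv_same_eq_keyEq]; exact hs
      have hcls : pvCharClass prev = pvCharClass i := pv_keyEq_class_eq hk
      simp only [if_true, List.takeWhile_cons, List.dropWhile_cons, hk]
      rcases hr : rest' with _ | ⟨a, t⟩
      · simp [pvGroupby]
      · subst hr
        rw [ih i (nw ++ [i]) (by simp)]
        simp [hcls]

-- A's grouping is the run decomposition on every token of length ≥ 2
theorem pv_sep_eq_groupby (c d : Char) (rest : List Char) :
    seperate_string_number (c :: d :: rest) = pvGroupby (c :: d :: rest) := by
  simp only [seperate_string_number]
  rw [pvSepLoop_eq_glue (d :: rest) 0 _ c [] [c] (by simp)]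
  rw [pvGlue_eq_groupby (d :: rest) c [c] (by simp)]
  conv_rhs => rw [pvGroupby]
  simp

-- takeWhile / dropWhile as take / drop at the run length
theorem pv_len_takeWhile_le (p : Char → Bool) (l : List Char) :
    (l.takeWhile p).length ≤ l.length := by
  induction l with
  | nil => simp
  | cons a t ih => by_cases h : p a <;> simp [List.takeWhile_cons, h] <;> omega

theorem pv_take_takeWhile (p : Char → Bool) (l : List Char) :
    l.take ((l.takeWhile p).length) = l.takeWhile p := by
  induction l with
  | nil => simp
  | cons a t ih => by_cases h : p a <;> simp [List.takeWhile_cons, h, ih]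

theorem pv_drop_takeWhile (p : Char → Bool) (l : List Char) :
    l.drop ((l.takeWhile p).length) = l.dropWhile p := by
  induction l with
  | nil => simp
  | cons a t ih => by_cases h : p a <;> simp [List.takeWhile_cons, List.dropWhile_cons, h, ih]

-- the key-run of a head of each class is the class-specific run
theorem pv_keyEq_alpha (d : Char) :
    pvKeyEq PvKey.alpha (pvCharClass d) = PySem.Chars.isalpha d := by
  unfold pvCharClass
  by_cases h : PySem.Chars.isalpha d = true <;> simp [h, pvKeyEq] <;> split_ifs <;> simp [pvKeyEq]

theorem pv_keyEq_num (d : Char) :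
    pvKeyEq PvKey.num (pvCharClass d) = PySem.Chars.isdigit d := by
  unfold pvCharClass
  by_cases hd : PySem.Chars.isdigit d = true <;>
  by_cases ha : PySem.Chars.isalpha d = true <;>
    simp_all [pv_alpha_not_digit, pvKeyEq]

-- length of the first maximal run
def pvRunLen (cs : List Char) : Nat :=
  match cs with
  | [] => 0
  | c :: rest =>
    if PySem.Chars.isalpha c then 1 + (rest.takeWhile PySem.Chars.isalpha).length
    else if PySem.Chars.isdigit c then 1 + (rest.takeWhile PySem.Chars.isdigit).length
    else 1

theorem pvRunLen_pos (c : Char) (rest : List Char) : 1 ≤ pvRunLen (c :: rest) := by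
  simp only [pvRunLen]; split_ifs <;> omega

theorem pvRunLen_le (cs : List Char) : pvRunLen cs ≤ cs.length := by
  rcases cs with _ | ⟨c, rest⟩
  · simp [pvRunLen]
  · have h1 := pv_len_takeWhile_le PySem.Chars.isalpha rest
    have h2 := pv_len_takeWhile_le PySem.Chars.isdigit rest
    simp only [pvRunLen, List.length_cons]; split_ifs <;> omega

-- the key-run split of c :: rest is the take/drop split at pvRunLen - 1 of rest
theorem pv_run_split (c : Char) (rest : List Char) :
    rest.takeWhile (fun d => pvKeyEq (pvCharClass c) (pvCharClass d)) =
        rest.take (pvRunLen (c :: rest) - 1) ∧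
      rest.dropWhile (fun d => pvKeyEq (pvCharClass c) (pvCharClass d)) =
        rest.drop (pvRunLen (c :: rest) - 1) := by
  by_cases ha : PySem.Chars.isalpha c = true
  · have hc : pvCharClass c = PvKey.alpha := by simp [pvCharClass, ha]
    have hp : (fun d => pvKeyEq (pvCharClass c) (pvCharClass d)) = PySem.Chars.isalpha := by
      funext d; rw [hc, pv_keyEq_alpha]
    rw [hp]
    simp only [pvRunLen, ha, if_true, Nat.add_sub_cancel_left]
    exact ⟨(pv_take_takeWhile _ _).symm, (pv_drop_takeWhile _ _).symm⟩
  · by_cases hd : PySem.Chars.isdigit c = true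
    · have hc : pvCharClass c = PvKey.num := by simp [pvCharClass, ha, hd]
      have hp : (fun d => pvKeyEq (pvCharClass c) (pvCharClass d)) = PySem.Chars.isdigit := by
        funext d; rw [hc, pv_keyEq_num]
      rw [hp]
      simp only [pvRunLen, ha, hd, if_true, Bool.false_eq_true, if_false, Nat.add_sub_cancel_left]
      exact ⟨(pv_take_takeWhile _ _).symm, (pv_drop_takeWhile _ _).symm⟩
    · have hc : pvCharClass c = PvKey.other := by simp [pvCharClass, ha, hd]
      have hp : (fun d => pvKeyEq (pvCharClass c) (pvCharClass d)) = fun _ => false := by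
        funext d; rw [hc]; cases pvCharClass d <;> rfl
      rw [hp]
      simp [pvRunLen, ha, hd]

-- first-group decomposition of the run decomposition
theorem pvGroupby_cons (c : Char) (rest : List Char) :
    pvGroupby (c :: rest) =
      (c :: rest).take (pvRunLen (c :: rest))
        :: pvGroupby ((c :: rest).drop (pvRunLen (c :: rest))) := by
  obtain ⟨ht, hd⟩ := pv_run_split c rest
  conv_lhs => rw [pvGroupby]
  have h1 : 1 ≤ pvRunLen (c :: rest) := pvRunLen_pos c rest
  have e : pvRunLen (c :: rest) = (pvRunLen (c :: rest) - 1) + 1 := by omega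
  rw [ht, hd, e]
  simp [List.take_succ_cons, List.drop_succ_cons]

-- the while loop of _run_end computes j plus the run length of the remaining suffix
theorem pvWhileRun_eq (p : Char → Bool) (token : List Char) (j : Nat) :
    pvWhileRun p token j = j + ((token.drop j).takeWhile p).length := by
  fun_induction pvWhileRun p token j with
  | case1 j h ih =>
    obtain ⟨hj, hp⟩ := h
    have hdj : List.drop j token = token.getD j ' ' :: List.drop (j + 1) token := by
      rw [List.getD_eq_getElem _ _ hj, List.drop_eq_getElem_cons hj]
    rw [ih, hdj, List.takeWhile_cons_of_pos hp]
    simp only [List.length_cons]; omega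
  | case2 j h =>
    by_cases hj : j < token.length
    · have hp : p (token.getD j ' ') = false := by
        rcases hp : p (token.getD j ' ') with _ | _
        · rfl
        · exact absurd ⟨hj, hp⟩ h
      have hdj : List.drop j token = token.getD j ' ' :: List.drop (j + 1) token := by
        rw [List.getD_eq_getElem _ _ hj, List.drop_eq_getElem_cons hj]
      rw [hdj, List.takeWhile_cons_of_neg (by rw [hp]; simp)]
      simp
    · rw [List.drop_eq_nil_of_le (by omega)]; simp

-- pvRunEnd at an in-range index is the end of the maximal run starting there
theorem pvRunEnd_eq (cs : List Char) (i : Nat) (h : i < cs.length) :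
    pvRunEnd cs i = some (i + pvRunLen (cs.drop i)) := by
  have hget : PySem.List.pyGet? cs (i : Int) = some cs[i] := by
    simp [List.getElem?_eq_getElem h]
  have hdi : cs.drop i = cs[i] :: cs.drop (i + 1) := List.drop_eq_getElem_cons h
  unfold pvRunEnd
  rw [hget]
  by_cases ha : PySem.Chars.isalpha cs[i] = true
  · simp only [ha, if_true, pvWhileRun_eq, hdi, pvRunLen, Option.some.injEq]
    omega
  · by_cases hd : PySem.Chars.isdigit cs[i] = true
    · simp only [ha, hd, if_true, if_false, pvWhileRun_eq, hdi, pvRunLen, Bool.false_eq_true,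
        Option.some.injEq]
      omega
    · simp only [ha, hd, if_false, Bool.false_eq_true, hdi, pvRunLen]

-- a token with a class break has its first run strictly inside it
theorem pv_break_runLen_lt (cs : List Char)
    (hb : ∃ j < cs.length, j + 1 < cs.length ∧
      ¬ (PySem.Chars.isalpha (cs.getD (j+1) ' ') = true ∧ PySem.Chars.isalpha (cs.getD j ' ') = true) ∧
      ¬ (PySem.Chars.isdigit (cs.getD (j+1) ' ') = true ∧ PySem.Chars.isdigit (cs.getD j ' ') = true)) :
    pvRunLen cs < cs.length := by
  obtain ⟨j, hj, hj1, hna, hnd⟩ := hb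
  rcases cs with _ | ⟨c, rest⟩
  · simp at hj
  · have hle := pvRunLen_le (c :: rest)
    rcases Nat.lt_or_ge (pvRunLen (c :: rest)) (c :: rest).length with hlt | hge
    · exact hlt
    exfalso
    have heq : pvRunLen (c :: rest) = (c :: rest).length := le_antisymm hle hge
    -- the whole token is one run: every character has the head's class
    have hall : ∀ p : Char → Bool, p c = true →
        (rest.takeWhile p).length = rest.length → ∀ k < (c :: rest).length,
        p ((c :: rest).getD k ' ') = true := by
      intro p hpc hlen k hk
      have htw : rest.takeWhile p = rest := by
        have := pv_take_takeWhile p rest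
        rw [hlen, List.take_length] at this
        exact this.symm
      have hmem : ∀ a ∈ rest, p a = true := by
        intro a hma
        exact List.takeWhile_eq_self_iff.mp htw a hma
      rcases k with _ | k
      · simpa using hpc
      · simp only [List.getD_cons_succ]
        have hk' : k < rest.length := by simp at hk; omega
        rw [List.getD_eq_getElem _ _ hk']
        exact hmem _ (List.getElem_mem hk')
    simp only [pvRunLen, List.length_cons] at heq
    by_cases ha : PySem.Chars.isalpha c = true
    · rw [if_pos ha] at heq
      have := hall PySem.Chars.isalpha ha (by omega)
      exact hna ⟨this (j+1) hj1, this j hj⟩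
    · by_cases hd : PySem.Chars.isdigit c = true
      · rw [if_neg ha, if_pos hd] at heq
        have := hall PySem.Chars.isdigit hd (by omega)
        exact hnd ⟨this (j+1) hj1, this j hj⟩
      · rw [if_neg ha, if_neg hd] at heq
        simp at hj1; omega

-- the two capitalizations coincide
theorem pv_cap_eq : pvCapitalize = pvCapitalizeAlt := by
  funext cs; cases cs <;> simp [pvCapitalize, pvCapitalizeAlt, PySem.Chars.lower]

-- per-token piece: on a token with a class break, A's group reads and B's run slices agree
theorem pv_step_eq (accA : List Char) (pieces : List (List Char)) (cs : List Char)
    (hacc : accA = pieces.flatten)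
    (hb : ∃ j < cs.length, j + 1 < cs.length ∧
      ¬ (PySem.Chars.isalpha (cs.getD (j+1) ' ') = true ∧ PySem.Chars.isalpha (cs.getD j ' ') = true) ∧
      ¬ (PySem.Chars.isdigit (cs.getD (j+1) ' ') = true ∧ PySem.Chars.isdigit (cs.getD j ' ') = true)) :
    (let letter_and_number_list := seperate_string_number cs
     match PySem.List.pyGet? letter_and_number_list 0, PySem.List.pyGet? letter_and_number_list 1 with
     | some g0, some g1 =>
       if g0 = ['1'] then accA ++ pvCapitalize g1 else accA ++ pvCapitalize g1 ++ g0
     | _, _ => accA) =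
    (let cs := cs
     match pvRunEnd cs 0 with
     | none => pieces
     | some cut =>
       match pvRunEnd cs cut with
       | none => pieces
       | some cut2 =>
         let coefficient := cs.take cut
         let element := (cs.drop cut).take (cut2 - cut)
         pieces ++ [if coefficient = ['1'] then pvCapitalizeAlt element
                    else pvCapitalizeAlt element ++ coefficient]).flatten := by
  have hlt : pvRunLen cs < cs.length := pv_break_runLen_lt cs hb
  have hpos : 1 ≤ cs.length := by omega
  -- B side
  have hre0 : pvRunEnd cs 0 = some (pvRunLen cs) := by
    have := pvRunEnd_eq cs 0 (by omega)
    simpa using this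
  have hre1 : pvRunEnd cs (pvRunLen cs) = some (pvRunLen cs + pvRunLen (cs.drop (pvRunLen cs))) :=
    pvRunEnd_eq cs (pvRunLen cs) hlt
  -- A side: two tokens of the run decomposition
  rcases cs with _ | ⟨c, _ | ⟨d, rest⟩⟩
  · simp [pvRunLen] at hlt
  · have := pvRunLen_pos c ([] : List Char)
    simp at hlt
    omega
  · have hsep : seperate_string_number (c :: d :: rest) = pvGroupby (c :: d :: rest) :=
      pv_sep_eq_groupby c d rest
    have hg1 : pvGroupby (c :: d :: rest) =
        (c :: d :: rest).take (pvRunLen (c :: d :: rest))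
          :: pvGroupby ((c :: d :: rest).drop (pvRunLen (c :: d :: rest))) := pvGroupby_cons c _
    obtain ⟨e, t, hdrop⟩ : ∃ e t, (c :: d :: rest).drop (pvRunLen (c :: d :: rest)) = e :: t := by
      rcases hdd : (c :: d :: rest).drop (pvRunLen (c :: d :: rest)) with _ | ⟨e, t⟩
      · exfalso
        have := List.drop_eq_nil_iff.mp hdd
        omega
      · exact ⟨e, t, rfl⟩
    have hg2 : pvGroupby ((c :: d :: rest).drop (pvRunLen (c :: d :: rest))) =
        ((c :: d :: rest).drop (pvRunLen (c :: d :: rest))).take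
            (pvRunLen ((c :: d :: rest).drop (pvRunLen (c :: d :: rest))))
          :: pvGroupby (((c :: d :: rest).drop (pvRunLen (c :: d :: rest))).drop
            (pvRunLen ((c :: d :: rest).drop (pvRunLen (c :: d :: rest))))) := by
      rw [hdrop]; exact pvGroupby_cons e t
    simp only [hsep, hg1, hg2]
    simp only [hre0]
    simp only [hre1]
    simp only [Nat.add_sub_cancel_left]
    have hget0 : ∀ (a b : List Char) (t' : List (List Char)),
        PySem.List.pyGet? (a :: b :: t') (0 : Int) = some a := by
      intro a b t'
      rw [show ((0:Int)) = ((0:Nat):Int) by norm_num, PySem.List.pyGet?_natCast]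
      simp
    have hget1 : ∀ (a b : List Char) (t' : List (List Char)),
        PySem.List.pyGet? (a :: b :: t') (1 : Int) = some b := by
      intro a b t'
      simp [PySem.List.pyGet?, PySem.List.pyIdx?]
    rw [hget0, hget1, pv_cap_eq, hacc]
    by_cases h1 : List.take (pvRunLen (c :: d :: rest)) (c :: d :: rest) = ['1'] <;>
      simp [h1]
  
-- the two builder folds agree token by token
theorem pv_fold_eq (l : List String)
    (hl : ∀ s ∈ l, ∃ j < s.toList.length, j + 1 < s.toList.length ∧
      ¬ (PySem.Chars.isalpha (s.toList.getD (j+1) ' ') = true ∧ PySem.Chars.isalpha (s.toList.getD j ' ') = true) ∧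
      ¬ (PySem.Chars.isdigit (s.toList.getD (j+1) ' ') = true ∧ PySem.Chars.isdigit (s.toList.getD j ' ') = true)) :
    ∀ (accA : List Char) (pieces : List (List Char)), accA = pieces.flatten →
      l.foldl (fun chemical_formula i =>
        let letter_and_number_list := seperate_string_number i.toList
        match PySem.List.pyGet? letter_and_number_list 0, PySem.List.pyGet? letter_and_number_list 1 with
        | some g0, some g1 =>
          if g0 = ['1'] then chemical_formula ++ pvCapitalize g1
          else chemical_formula ++ pvCapitalize g1 ++ g0
        | _, _ => chemical_formula) accA =
      (l.foldl (fun pieces token =>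
        let cs := token.toList
        match pvRunEnd cs 0 with
        | none => pieces
        | some cut =>
          match pvRunEnd cs cut with
          | none => pieces
          | some cut2 =>
            let coefficient := cs.take cut
            let element := (cs.drop cut).take (cut2 - cut)
            pieces ++ [if coefficient = ['1'] then pvCapitalizeAlt element
                       else pvCapitalizeAlt element ++ coefficient]) pieces).flatten := by
  induction l with
  | nil => intro accA pieces h; simpa using h
  | cons s t ih =>
    intro accA pieces hacc
    simp only [List.foldl_cons]
    have hstep := pv_step_eq accA pieces s.toList hacc (hl s (by simp))
    have hl' : ∀ s' ∈ t, _ := fun s' hm => hl s' (by simp [hm])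
    -- rewrite A's new accumulator as the flatten of B's new pieces
    rcases hre0 : pvRunEnd s.toList 0 with _ | cut
    · simp only [hre0] at hstep ⊢
      exact ih (fun s' hm => hl s' (by simp [hm])) _ _ hstep
    · rcases hre1 : pvRunEnd s.toList cut with _ | cut2
      · simp only [hre0, hre1] at hstep ⊢
        exact ih (fun s' hm => hl s' (by simp [hm])) _ _ hstep
      · simp only [hre0, hre1] at hstep ⊢
        exact ih (fun s' hm => hl s' (by simp [hm])) _ _ hstep

-- ===== VERDICT (by name: the statement is the Claim_ definition above) =====
theorem chemical_formula_builder_spec : Claim_equal_chemical_formula_builder := by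
  intro user_input _ hpre
  unfold Spec_chemical_formula_builder chemical_formula_builder chemical_formula_builder_alt
  congr 1
  exact pv_fold_eq user_input hpre [] [] rfl
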